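-- pv_equiv track=rewrite | github.com/Disi77/Advent-of-Code | AdventOfCode2023/day13/puzzle1.py | find_vertical_line_reflection
-- ===== SOURCE A (Python) =====
-- def find_vertical_line_reflection(pattern_raw_data):
--     '''
--     Try to find vertical line reflection
--              |
--         #.##.|.##.
--         ..#.#|#.#.
--         ##...|...#
--         ##...|...#
--         ..#.#|#.#.
--         ..##.|.##.
--         #.#.#|#.#.
--              |
--     Returns index of column left of the vertical line.
--     Returns -1 if there is no vertical reflection.
--     '''
--     pattern = [x for x in pattern_raw_data.split("\n")]
--
--     for i in range(len(pattern[0]) - 1):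
--         for row in pattern:
--             left, right = row[:i+1], row[i+1:]
--             lenght = min(len(left), len(right))
--             left, right = left[-lenght:], right[:lenght]
--             if left[::-1] != right:
--                 break
--         else:
--             return i + 1
--     return -1
-- ===== SOURCE B (Python) =====
-- def find_vertical_line_reflection(pattern_raw_data):
--     '''Row-major candidate filtering: keep the set of still-possible axes while
--     scanning the rows once, testing each axis by pointwise mirror comparison.'''
--     rows = pattern_raw_data.split("\n")
--     width = len(rows[0])
--     candidates = list(range(width - 1))
--     for row in rows:
--         if not row:
--             continue  # a blank line constrains no axis
--         candidates = [i for i in candidates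
--                       if len(row) > i + 1
--                       and all(row[i - k] == row[i + 1 + k]
--                               for k in range(min(i + 1, len(row) - i - 1)))]
--     return candidates[0] + 1 if candidates else -1
-- ===== Notes on version B (the rewrite author's own statement) =====
-- stated objective: alternative
-- what changed: A scans axis-major, re-slicing and reversing each row per candidate axis with a for-else break; B scans row-major, maintaining the list of still-viable axes and pruning it per row with a pointwise expanding mirror test, then returns the smallest survivor.
import Mathlib
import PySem

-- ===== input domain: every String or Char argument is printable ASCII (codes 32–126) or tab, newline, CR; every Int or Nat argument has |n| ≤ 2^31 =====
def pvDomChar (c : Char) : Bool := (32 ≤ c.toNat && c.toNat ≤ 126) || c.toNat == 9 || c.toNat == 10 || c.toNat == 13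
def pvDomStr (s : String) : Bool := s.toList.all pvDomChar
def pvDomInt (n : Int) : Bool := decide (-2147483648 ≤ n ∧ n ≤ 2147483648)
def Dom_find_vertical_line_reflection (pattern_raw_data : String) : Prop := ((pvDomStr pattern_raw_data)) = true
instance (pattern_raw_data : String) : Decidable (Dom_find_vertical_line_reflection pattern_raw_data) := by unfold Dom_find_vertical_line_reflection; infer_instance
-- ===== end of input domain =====

-- B replaces A's axis-major slice/reverse scan by a row-major pass that filters the list of
-- still-viable axes with a pointwise mirror test (alternative decomposition, same cost).

-- ===== PORT A =====
-- A's inner-loop body: left/right slices around the axis, trim to the shorter length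
-- (left[-lenght:] keeps Python's -0 behaviour via PySem.List.slice), reversed compare.
def pvRowOkA (i : Int) (row : List Char) : Bool :=
  let left := PySem.List.slice row none (some (i + 1))
  let right := PySem.List.slice row (some (i + 1)) none
  let lenght : Int := min ((left.length : Int)) ((right.length : Int))
  let left2 := PySem.List.slice left (some (-lenght)) none
  let right2 := PySem.List.slice right none (some lenght)
  match PySem.List.slice? left2 none none (-1) with   -- left[::-1]
  | some rev => rev == right2
  | none => false

-- the for-i loop with the for-else inner loop (inner for/break/else = List.all)
def pvGoA (pattern : List (List Char)) : List Int → Int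
  | [] => -1
  | i :: rest => if pattern.all (fun row => pvRowOkA i row) then i + 1 else pvGoA pattern rest

def find_vertical_line_reflection (pattern_raw_data : String) : Int :=
  let pattern := PySem.Chars.splitOn pattern_raw_data.toList "\n".toList
  pvGoA pattern (PySem.List.pyRange 0 (((PySem.List.pyGetD pattern 0 []).length : Int) - 1) 1)

-- ===== PORT B =====
-- B's comprehension condition: the row extends past the axis and mirrors pointwise around it.
def pvRowOkB (row : List Char) (i : Int) : Bool :=
  decide ((row.length : Int) > i + 1) &&
    (PySem.List.pyRange 0 (min (i + 1) ((row.length : Int) - i - 1)) 1).all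
      (fun k => PySem.List.pyGet? row (i - k) == PySem.List.pyGet? row (i + 1 + k))

def find_vertical_line_reflection_alt (pattern_raw_data : String) : Int :=
  let rows := PySem.Chars.splitOn pattern_raw_data.toList "\n".toList
  let width : Int := ((PySem.List.pyGetD rows 0 []).length : Int)
  let final := rows.foldl
    (fun cs row => if row.isEmpty then cs else cs.filter (pvRowOkB row))
    (PySem.List.pyRange 0 (width - 1) 1)
  match final with
  | [] => -1
  | c :: _ => c + 1

-- ===== PRECONDITION & SPEC =====
def Spec_find_vertical_line_reflection (pattern_raw_data : String) (out : Int) : Prop := out = find_vertical_line_reflection_alt pattern_raw_data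
instance (pattern_raw_data : String) (out : Int) : Decidable (Spec_find_vertical_line_reflection pattern_raw_data out) := by unfold Spec_find_vertical_line_reflection; infer_instance

-- ===== CLAIM (what is proved, stated in full; the proofs are below) =====
def Claim_equal_find_vertical_line_reflection : Prop := ∀ (pattern_raw_data : String), Dom_find_vertical_line_reflection pattern_raw_data → Spec_find_vertical_line_reflection pattern_raw_data (find_vertical_line_reflection pattern_raw_data)

-- ===== LEMMAS AND PROOFS =====

-- B's row-major fold of filters computes one filter by the conjunction over all rows.
theorem pv_fold_filter (rows : List (List Char)) (cs : List Int) :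
    rows.foldl (fun cs row => if row.isEmpty then cs else cs.filter (pvRowOkB row)) cs
      = cs.filter (fun i => rows.all (fun r => r.isEmpty || pvRowOkB r i)) := by
  induction rows generalizing cs with
  | nil => simp
  | cons r rows ih =>
    simp only [List.foldl_cons, ih, List.all_cons]
    by_cases h : r.isEmpty
    · simp [h]
    · simp only [h, Bool.false_eq_true, if_false, List.filter_filter]
      congr 1
      funext i
      simp [h, Bool.and_comm]

-- A's row test agrees with "empty row, or B's pointwise mirror test" for nonnegative axes.
theorem pv_row_eq (row : List Char) (i : Int) (hi : 0 ≤ i) :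
    pvRowOkA i row = (row.isEmpty || pvRowOkB row i) := by
  obtain ⟨J, hJ⟩ : ∃ J : Nat, (J : Int) = i + 1 := ⟨(i+1).toNat, by omega⟩
  have hJ1 : 1 ≤ J := by omega
  unfold pvRowOkA pvRowOkB
  dsimp only
  rw [← hJ, PySem.List.slice_to_natCast, PySem.List.slice_from_natCast,
    PySem.List.slice?_none_none_neg_one]
  simp only [List.length_take, List.length_drop]
  by_cases hcase : row.length ≤ J
  · -- the axis is at or past the row's end: right slice empty, lenght = 0,
    -- and left[-0:] keeps all of left, so only the empty row passes
    have h0 : min ((min J row.length : Nat) : Int) ((row.length - J : Nat) : Int)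
        = ((0:Nat):Int) := by
      have : row.length - J = 0 := by omega
      rw [this]; simp
    rw [h0, Nat.cast_zero, neg_zero]
    rw [PySem.List.slice_zero_start, PySem.List.slice_none_none,
      PySem.List.slice_to _ (le_refl (0:Int))]
    have hfalse : (decide ((row.length:Int) > (J:Int))) = false := by
      simp; omega
    rw [hfalse]
    simp [List.take_of_length_le hcase, List.isEmpty_iff, List.reverse_eq_nil_iff]
  · -- proper overlap around the axis
    rw [not_le] at hcase
    have hrow : row.isEmpty = false := by
      rw [List.isEmpty_eq_false_iff, ← List.length_pos_iff]; omega
    obtain ⟨N, hN⟩ : ∃ N, min J (row.length - J) = N := ⟨_, rfl⟩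
    have hN1 : 1 ≤ N := by omega
    have hNJ : N ≤ J := by omega
    have hNm : N ≤ row.length - J := by omega
    have hminJ : min J row.length = J := by omega
    have hcast : min ((min J row.length : Nat) : Int) ((row.length - J : Nat) : Int)
        = ((N:Nat):Int) := by push_cast; omega
    rw [hcast, PySem.List.slice_from_neg_natCast (row.take J) N (by omega),
      PySem.List.slice_to_natCast]
    simp only [List.length_take, hminJ]
    have htrue : (decide ((row.length:Int) > (J:Int))) = true := by simp; omega
    have hmin2 : min ((J:Int)) ((row.length:Int) - i - 1) = ((N:Nat):Int) := by
      push_cast; omega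
    rw [hrow, htrue, hmin2]
    simp only [Bool.false_or, Bool.true_and]
    rw [Bool.eq_iff_iff, beq_iff_eq, List.all_eq_true]
    have hlenD : ((row.take J).drop (J - N)).length = N := by simp [hminJ]; omega
    have hkey : (((row.take J).drop (J - N)).reverse = (row.drop J).take N)
        ↔ ∀ k : Nat, k < N → row[J - 1 - k]? = row[J + k]? := by
      constructor
      · intro h k hk
        have h' := congrArg (fun l => l[k]?) h
        simp only at h'
        rw [List.getElem?_reverse (by omega), hlenD,
          List.getElem?_drop, show J - N + (N - 1 - k) = J - 1 - k by omega,
          List.getElem?_take_of_lt (by omega : J - 1 - k < J),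
          List.getElem?_take_of_lt hk, List.getElem?_drop] at h'
        exact h'
      · intro hp
        apply List.ext_getElem?
        intro n
        by_cases hn : n < N
        · rw [List.getElem?_reverse (by omega), hlenD,
            List.getElem?_drop, show J - N + (N - 1 - n) = J - 1 - n by omega,
            List.getElem?_take_of_lt (by omega : J - 1 - n < J),
            List.getElem?_take_of_lt hn, List.getElem?_drop]
          exact hp n hn
        · rw [List.getElem?_eq_none (by simp [hlenD]; omega),
            List.getElem?_eq_none (by simp; omega)]
    rw [hkey]
    constructor
    · intro hp x hx
      have hx' := PySem.List.mem_pyRange_one.mp hx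
      obtain ⟨k, hk⟩ : ∃ k : Nat, (k:Int) = x := ⟨x.toNat, by omega⟩
      have hkN : k < N := by omega
      rw [show i - x = ((J - 1 - k : Nat) : Int) by push_cast; omega,
        show (J:Int) + x = ((J + k : Nat) : Int) by push_cast; omega,
        PySem.List.pyGet?_natCast, PySem.List.pyGet?_natCast, beq_iff_eq]
      exact hp k hkN
    · intro hall k hk
      have hx : ((k:Int)) ∈ PySem.List.pyRange 0 ((N:Nat):Int) 1 :=
        PySem.List.mem_pyRange_one.mpr (by push_cast; omega)
      have h' := hall _ hx
      rw [show i - ((k:Nat):Int) = ((J - 1 - k : Nat) : Int) by push_cast; omega,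
        show (J:Int) + ((k:Nat):Int) = ((J + k : Nat) : Int) by push_cast; omega,
        PySem.List.pyGet?_natCast, PySem.List.pyGet?_natCast, beq_iff_eq] at h'
      exact h'

-- A's first-success search over a list of axes is the head of the filtered list.
theorem pv_goA_eq (pattern : List (List Char)) (l : List Int) :
    pvGoA pattern l
      = match l.filter (fun i => pattern.all (fun row => pvRowOkA i row)) with
        | [] => -1
        | c :: _ => c + 1 := by
  induction l with
  | nil => simp [pvGoA]
  | cons i rest ih =>
    by_cases h : pattern.all (fun row => pvRowOkA i row)
    · simp [pvGoA, h, List.filter_cons]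
    · simp [pvGoA, h, ih]

-- ===== VERDICT (by name: the statement is the Claim_ definition above) =====
theorem find_vertical_line_reflection_spec : Claim_equal_find_vertical_line_reflection := by
  intro s _hdom
  unfold Spec_find_vertical_line_reflection
  show pvGoA (PySem.Chars.splitOn s.toList "\n".toList)
      (PySem.List.pyRange 0 (((PySem.List.pyGetD (PySem.Chars.splitOn s.toList "\n".toList) 0 []).length : Int) - 1) 1)
    = match (PySem.Chars.splitOn s.toList "\n".toList).foldl
        (fun cs row => if row.isEmpty then cs else cs.filter (pvRowOkB row))
        (PySem.List.pyRange 0 (((PySem.List.pyGetD (PySem.Chars.splitOn s.toList "\n".toList) 0 []).length : Int) - 1) 1) with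
      | [] => -1
      | c :: _ => c + 1
  rw [pv_fold_filter, pv_goA_eq]
  have hfil : ∀ (pattern : List (List Char)) (rng : List Int),
      (∀ i ∈ rng, (0:Int) ≤ i) →
      rng.filter (fun i => pattern.all (fun row => pvRowOkA i row))
        = rng.filter (fun i => pattern.all (fun r => r.isEmpty || pvRowOkB r i)) := by
    intro pattern rng h
    refine List.filter_congr ?_
    intro i hi
    have h0 := h i hi
    simp only [pv_row_eq _ _ h0]
  rw [hfil]
  intro i hi
  have := PySem.List.mem_pyRange_one.mp hi
  omega
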